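-- pv_equiv track=rewrite | github.com/yuezhihuafou/gzjc | tools/load_cwru.py | find_signal_keys
-- ===== SOURCE A (Python) =====
-- from typing import Dict, List, Tuple, Optional, Any
--
-- def find_signal_keys(mat_dict: Dict, sensor_locations: Optional[List[str]] = None) -> List[Tuple[str, str]]:
--     """
--     查找所有可用的时间序列信号键，返回 [(location, key)] 列表。
--     优先匹配 'DE_time'、'FE_time'、'BA_time'，其次匹配包含 '_time' 的键。
--     可通过 sensor_locations 指定需要的通道集合，例如 ['DE','FE']。
--     """
--     candidates: List[Tuple[str, str]] = []
--     loc_order = ['DE', 'FE', 'BA']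
--     loc_patterns = {
--         'DE': ['DE_time', 'DE-'],
--         'FE': ['FE_time', 'FE-'],
--         'BA': ['BA_time', 'BA-'],
--     }
--
--     def add_candidate(location: str, key: str):
--         if sensor_locations and location not in sensor_locations:
--             return
--         candidates.append((location, key))
--
--     # 先按明确的键名匹配
--     for key in mat_dict.keys():
--         if key.startswith('__'):
--             continue
--         for loc in loc_order:
--             for pat in loc_patterns[loc]:
--                 if pat in key:
--                     add_candidate(loc, key)
--                     break
--
--     # 再补充 '_time' 模式
--     for key in mat_dict.keys():
--         if key.startswith('__'):
--             continue
--         if '_time' in key and all(key != k for _, k in candidates):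
--             # 未能确定具体位置，标记为 'DE' 优先或 'UNK'
--             add_candidate('DE', key)
--
--     # 去重并按 loc_order 排序
--     seen = set()
--     unique_candidates: List[Tuple[str, str]] = []
--     for loc in loc_order:
--         for l, k in candidates:
--             if l == loc and (l, k) not in seen:
--                 unique_candidates.append((l, k))
--                 seen.add((l, k))
--     return unique_candidates
-- ===== SOURCE B (Python) =====
-- from typing import Dict, List, Tuple, Optional
--
-- def find_signal_keys(mat_dict: Dict, sensor_locations: Optional[List[str]] = None) -> List[Tuple[str, str]]:
--     def ok(loc):
--         return not sensor_locations or loc in sensor_locations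
--     keys = [k for k in mat_dict.keys() if not k.startswith('__')]
--     def hits(loc):
--         return [k for k in keys if loc + '_time' in k or loc + '-' in k]
--     placed = {k for loc in ('DE', 'FE', 'BA') if ok(loc) for k in hits(loc)}
--     out: List[Tuple[str, str]] = []
--     for loc in ('DE', 'FE', 'BA'):
--         if ok(loc):
--             out.extend((loc, k) for k in hits(loc))
--             if loc == 'DE':
--                 out.extend(('DE', k) for k in keys if '_time' in k and k not in placed)
--     return out
-- ===== Notes on version B (the rewrite author's own statement) =====
-- stated objective: alternative
-- what changed: B transposes A's loop nest: instead of A's key-outer scan building one interleaved candidates list, then a second full scan with an O(n) all(...) membership test per '_time' key, then a seen-set dedup/reorder pass, B runs one staged pass per location (location-outer), emitting each allowed location's matching keys directly by a filter over the '__'-stripped key list, with the fallback '_time' keys computed declaratively against a set of all matched keys and appended after the DE pass; no candidates list, no dedup pass and no per-key membership rescan exist in B.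
import Mathlib
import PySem

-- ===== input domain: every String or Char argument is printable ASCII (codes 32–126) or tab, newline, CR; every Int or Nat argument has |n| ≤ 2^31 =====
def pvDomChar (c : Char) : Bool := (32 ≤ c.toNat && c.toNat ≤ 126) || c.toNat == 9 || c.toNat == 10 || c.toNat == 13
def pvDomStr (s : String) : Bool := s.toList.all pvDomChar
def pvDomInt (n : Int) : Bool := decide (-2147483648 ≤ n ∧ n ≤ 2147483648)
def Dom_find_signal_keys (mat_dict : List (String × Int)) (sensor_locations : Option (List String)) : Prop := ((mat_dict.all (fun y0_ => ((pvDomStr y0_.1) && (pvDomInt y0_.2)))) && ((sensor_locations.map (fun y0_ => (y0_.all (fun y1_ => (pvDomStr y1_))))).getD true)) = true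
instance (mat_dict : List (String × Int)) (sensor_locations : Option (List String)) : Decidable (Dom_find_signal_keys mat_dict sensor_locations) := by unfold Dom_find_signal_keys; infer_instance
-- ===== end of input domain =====

-- B transposes A's loop nest: one staged pass per location (location-outer filters over the
-- '__'-stripped key list), fallback '_time' keys computed against a set of all matched keys and
-- appended after the DE pass — no candidates list, no per-key membership rescan, no dedup/reorder
-- pass (objective: alternative decomposition).

-- ===== PORT A =====
-- 'if sensor_locations and location not in sensor_locations: return' — append iff sl is None/empty or loc ∈ sl
def fskAllowed (sl : Option (List String)) (loc : String) : Bool :=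
  match sl with
  | none => true
  | some l => l.isEmpty || l.contains loc

def fskAdd (sl : Option (List String)) (loc key : String) (cands : List (String × String)) : List (String × String) :=
  if fskAllowed sl loc then cands ++ [(loc, key)] else cands

-- loc_patterns[loc]; only ever looked up at the three keys present in the dict
def fskLocPatterns (loc : String) : List String :=
  if loc == "DE" then ["DE_time", "DE-"]
  else if loc == "FE" then ["FE_time", "FE-"]
  else if loc == "BA" then ["BA_time", "BA-"]
  else []

-- 'for pat in loc_patterns[loc]: if pat in key: add_candidate(loc, key); break'
def fskTryPats (sl : Option (List String)) (loc key : String) (pats : List String) (cands : List (String × String)) : List (String × String) :=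
  match pats with
  | [] => cands
  | p :: rest => if PySem.Str.isIn p key then fskAdd sl loc key cands else fskTryPats sl loc key rest cands

def find_signal_keys (mat_dict : List (String × Int)) (sensor_locations : Option (List String)) : List (String × String) :=
  let keys := (PySem.Dict.ofList mat_dict).keys
  let cands1 := keys.foldl (fun c key =>
      if PySem.Str.startswith key "__" then c
      else ["DE", "FE", "BA"].foldl (fun c loc => fskTryPats sensor_locations loc key (fskLocPatterns loc) c) c) []
  let cands2 := keys.foldl (fun c key =>
      if PySem.Str.startswith key "__" then c
      else if PySem.Str.isIn "_time" key && c.all (fun p => key != p.2)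
      then fskAdd sensor_locations "DE" key c else c) cands1
  (["DE", "FE", "BA"].foldl (fun (st : List (String × String) × PySem.Set (String × String)) loc =>
      cands2.foldl (fun st p =>
        if p.1 == loc && !(PySem.Set.contains st.2 p) then (st.1 ++ [p], PySem.Set.add st.2 p) else st) st)
    ([], PySem.Set.empty)).1

-- ===== PORT B =====
-- 'def ok(loc): return not sensor_locations or loc in sensor_locations'
def fskOk (sl : Option (List String)) (loc : String) : Bool :=
  match sl with
  | none => true
  | some l => l.isEmpty || l.contains loc

-- 'def hits(loc): return [k for k in keys if loc + "_time" in k or loc + "-" in k]'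
def fskHits (keys : List String) (loc : String) : List String :=
  keys.filter (fun k => PySem.Str.isIn (loc ++ "_time") k || PySem.Str.isIn (loc ++ "-") k)

def find_signal_keys_alt (mat_dict : List (String × Int)) (sensor_locations : Option (List String)) : List (String × String) :=
  let keys := ((PySem.Dict.ofList mat_dict).keys).filter (fun k => !PySem.Str.startswith k "__")
  -- 'placed = {k for loc in (...) if ok(loc) for k in hits(loc)}' (only membership is used)
  let placed : PySem.Set String :=
    PySem.Set.ofList ((["DE", "FE", "BA"].filter (fskOk sensor_locations)).flatMap (fskHits keys))
  ["DE", "FE", "BA"].foldl (fun out loc =>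
    if fskOk sensor_locations loc then
      let out := out ++ (fskHits keys loc).map (fun k => (loc, k))
      if loc == "DE" then
        out ++ (keys.filter (fun k => PySem.Str.isIn "_time" k && !(PySem.Set.contains placed k))).map
          (fun k => ("DE", k))
      else out
    else out) []

-- ===== PRECONDITION & SPEC =====
def Spec_find_signal_keys (mat_dict : List (String × Int)) (sensor_locations : Option (List String)) (out : List (String × String)) : Prop := out = find_signal_keys_alt mat_dict sensor_locations
instance (mat_dict : List (String × Int)) (sensor_locations : Option (List String)) (out : List (String × String)) : Decidable (Spec_find_signal_keys mat_dict sensor_locations out) := by unfold Spec_find_signal_keys; infer_instance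

-- ===== CLAIM (what is proved, stated in full; the proofs are below) =====
def Claim_equal_find_signal_keys : Prop := ∀ (mat_dict : List (String × Int)) (sensor_locations : Option (List String)), Dom_find_signal_keys mat_dict sensor_locations → Spec_find_signal_keys mat_dict sensor_locations (find_signal_keys mat_dict sensor_locations)

-- ===== LEMMAS AND PROOFS =====

-- per-location entry of a key, and the per-key chunk of A's first-pass candidates list
def fskE (allow : String → Bool) (loc pt pd k : String) : List (String × String) :=
  if (PySem.Str.isIn pt k || PySem.Str.isIn pd k) && allow loc then [(loc, k)] else []

def fskChunkDE (allow : String → Bool) (k : String) : List (String × String) :=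
  if PySem.Str.startswith k "__" then [] else fskE allow "DE" "DE_time" "DE-" k
def fskChunkFE (allow : String → Bool) (k : String) : List (String × String) :=
  if PySem.Str.startswith k "__" then [] else fskE allow "FE" "FE_time" "FE-" k
def fskChunkBA (allow : String → Bool) (k : String) : List (String × String) :=
  if PySem.Str.startswith k "__" then [] else fskE allow "BA" "BA_time" "BA-" k
def fskChunk (allow : String → Bool) (k : String) : List (String × String) :=
  fskChunkDE allow k ++ fskChunkFE allow k ++ fskChunkBA allow k

-- fallback chunk of A's second pass
def fskD (allow : String → Bool) (k : String) : List (String × String) :=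
  if allow "DE" then [("DE", k)] else []

-- '_time' predicate shared by both passes
def fskG (k : String) : Bool := !PySem.Str.startswith k "__" && PySem.Str.isIn "_time" k

theorem fskOk_eq : fskOk = fskAllowed := rfl

theorem fskTryPats_eq (sl : Option (List String)) (loc pt pd k : String) (c : List (String × String)) :
    fskTryPats sl loc k [pt, pd] c = c ++ fskE (fskAllowed sl) loc pt pd k := by
  simp only [fskTryPats, fskAdd, fskE]
  split_ifs <;> simp_all

-- A's first pass is the flatMap of per-key chunks
theorem fskA_loop1 (sl : Option (List String)) (keys : List String) (c0 : List (String × String)) :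
    keys.foldl (fun c key =>
      if PySem.Str.startswith key "__" then c
      else ["DE", "FE", "BA"].foldl (fun c loc => fskTryPats sl loc key (fskLocPatterns loc) c) c) c0
    = c0 ++ keys.flatMap (fskChunk (fskAllowed sl)) := by
  have h1 : fskLocPatterns "DE" = ["DE_time", "DE-"] := by rfl
  have h2 : fskLocPatterns "FE" = ["FE_time", "FE-"] := by rfl
  have h3 : fskLocPatterns "BA" = ["BA_time", "BA-"] := by rfl
  have hstep : ∀ (c : List (String × String)) (k : String), k ∈ keys →
      (if PySem.Str.startswith k "__" then c
       else ["DE", "FE", "BA"].foldl (fun c loc => fskTryPats sl loc k (fskLocPatterns loc) c) c)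
      = c ++ fskChunk (fskAllowed sl) k := by
    intro c k _
    simp only [List.foldl_cons, List.foldl_nil, h1, h2, h3, fskTryPats_eq,
      fskChunk, fskChunkDE, fskChunkFE, fskChunkBA]
    by_cases hs : PySem.Chars.startswith k.toList ['_', '_'] <;>
      simp [PySem.Str.startswith_eq, hs, List.append_assoc]
  have hc := PySem.List.foldl_congr_mem keys _ _ c0 hstep
  rw [hc, PySem.List.foldl_append_eq_flatMap]

-- A's second pass: the growing-accumulator membership test reduces to a test against cands1
theorem fskA_loop2 (sl : Option (List String)) (keys : List String) (hnd : keys.Nodup) (c0 : List (String × String)) :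
    keys.foldl (fun c key =>
      if PySem.Str.startswith key "__" then c
      else if PySem.Str.isIn "_time" key && c.all (fun p => key != p.2)
      then fskAdd sl "DE" key c else c) c0
    = c0 ++ (keys.filter (fun k => fskG k && c0.all (fun p => k != p.2))).flatMap (fskD (fskAllowed sl)) := by
  induction keys generalizing c0 with
  | nil => simp
  | cons k rest ih =>
    rcases List.nodup_cons.mp hnd with ⟨hk, hrest⟩
    simp only [List.foldl_cons, List.filter_cons]
    by_cases hs : PySem.Str.startswith k "__"
    · have hs' : PySem.Chars.startswith k.toList ['_', '_'] = true := hs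
      rw [if_pos hs, ih hrest c0]
      have hp : (fskG k && c0.all (fun p => k != p.2)) = false := by simp [fskG, hs']
      rw [hp]; simp
    · have hs' : PySem.Chars.startswith k.toList ['_', '_'] = false := Bool.eq_false_iff.mpr hs
      rw [if_neg hs]
      by_cases ht : PySem.Str.isIn "_time" k && c0.all (fun p => k != p.2)
      · rw [if_pos ht]
        have ht2 := ht
        simp only [Bool.and_eq_true] at ht2
        have hti : PySem.Chars.isIn ['_', 't', 'i', 'm', 'e'] k.toList = true := ht2.1
        have hall := ht2.2
        have hadd : fskAdd sl "DE" k c0 = c0 ++ fskD (fskAllowed sl) k := by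
          unfold fskAdd fskD; split_ifs <;> simp
        rw [hadd, ih hrest]
        have hfc := List.filter_congr (l := rest)
          (p := fun k' => fskG k' && (c0 ++ fskD (fskAllowed sl) k).all (fun p => k' != p.2))
          (q := fun k' => fskG k' && c0.all (fun p => k' != p.2)) ?_
        · rw [hfc]
          have hg : (fskG k && c0.all (fun p => k != p.2)) = true := by
            simp [fskG, hs', hti, hall]
          rw [hg]
          simp [List.append_assoc]
        · intro k' hk'
          have hne : k' ≠ k := fun h => hk (h ▸ hk')
          have hbne : (k' != k) = true := bne_iff_ne.mpr hne
          by_cases ha : fskAllowed sl "DE" <;>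
            simp [fskD, ha, List.all_append, hbne]
      · rw [if_neg ht, ih hrest c0]
        have hp : (fskG k && c0.all (fun p => k != p.2)) = false := by
          cases hi : PySem.Str.isIn "_time" k
          · have hi' : PySem.Chars.isIn ['_', 't', 'i', 'm', 'e'] k.toList = false := hi
            simp [fskG, hi']
          · have hall : (c0.all fun p => k != p.2) = false := by
              cases hA : (c0.all fun p => k != p.2)
              · rfl
              · exact absurd (by rw [hi, hA]; rfl) ht
            have hi' : PySem.Chars.isIn ['_', 't', 'i', 'm', 'e'] k.toList = true := hi
            simp [fskG, hs', hi', hall]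
        rw [hp]; simp

-- A's per-location dedup pass on a Nodup list is a plain filter
theorem fskA_dedupPass (loc : String) (cs out seen : List (String × String)) (hnd : cs.Nodup)
    (hseen : ∀ p ∈ cs, p.1 = loc → p ∉ seen) :
    cs.foldl (fun st p =>
        if p.1 == loc && !(PySem.Set.contains st.2 p) then (st.1 ++ [p], PySem.Set.add st.2 p) else st) (out, seen)
    = (out ++ cs.filter (fun p => p.1 == loc), seen ++ cs.filter (fun p => p.1 == loc)) := by
  induction cs generalizing out seen with
  | nil => simp
  | cons p rest ih =>
    rcases List.nodup_cons.mp hnd with ⟨hp, hrest⟩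
    simp only [List.foldl_cons, List.filter_cons]
    by_cases hl : p.1 == loc
    · have hpl : p.1 = loc := by simpa using hl
      have hnotin : p ∉ seen := hseen p List.mem_cons_self hpl
      have hcon : PySem.Set.contains seen p = false := by
        rw [Bool.eq_false_iff]
        intro hc
        exact hnotin ((PySem.Set.contains_iff seen p).mp hc)
      have hadd : PySem.Set.add seen p = seen ++ [p] := by
        unfold PySem.Set.add
        simp [hnotin]
      have hseen' : ∀ q ∈ rest, q.1 = loc → q ∉ seen ++ [p] := by
        intro q hq hql
        simp only [List.mem_append, List.mem_singleton]
        rintro (h | h)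
        · exact hseen q (List.mem_cons_of_mem _ hq) hql h
        · exact hp (h ▸ hq)
      rw [if_pos (show (p.1 == loc && !(PySem.Set.contains seen p)) = true by simp [hl, hnotin]),
        hadd, ih (out ++ [p]) (seen ++ [p]) hrest hseen']
      simp [hl, List.append_assoc]
    · have hl' : (p.1 == loc) = false := Bool.eq_false_iff.mpr hl
      rw [if_neg (show ¬ (p.1 == loc && !(PySem.Set.contains seen p)) = true by simp [hl']),
        ih out seen hrest (fun q hq hql => hseen q (List.mem_cons_of_mem _ hq) hql)]
      simp [hl']

-- flatMap of per-key chunks is Nodup when the keys are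
theorem fskNodup_flatMap {f : String → List (String × String)} (keys : List String) (hnd : keys.Nodup)
    (hf : ∀ k, (f k).Nodup) (hsnd : ∀ k p, p ∈ f k → p.2 = k) :
    (keys.flatMap f).Nodup := by
  induction keys with
  | nil => simp
  | cons k rest ih =>
    simp only [List.flatMap_cons]
    rcases List.nodup_cons.mp hnd with ⟨hk, hrest⟩
    refine List.Nodup.append (hf k) (ih hrest) ?_
    intro p hp hp'
    rcases List.mem_flatMap.mp hp' with ⟨k', hk', hpk'⟩
    have h1 := hsnd k p hp
    have h2 := hsnd k' p hpk'
    exact hk (h1 ▸ h2 ▸ hk')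

-- small facts about the chunk shapes
theorem fskChunk_nodup (allow : String → Bool) (k : String) : (fskChunk allow k).Nodup := by
  unfold fskChunk fskChunkDE fskChunkFE fskChunkBA fskE
  split_ifs <;> simp

theorem fskChunk_snd (allow : String → Bool) (k : String) (p : String × String)
    (hp : p ∈ fskChunk allow k) : p.2 = k := by
  unfold fskChunk fskChunkDE fskChunkFE fskChunkBA fskE at hp
  split_ifs at hp <;> aesop

theorem fskD_nodup (allow : String → Bool) (k : String) : (fskD allow k).Nodup := by
  unfold fskD; split_ifs <;> simp

theorem fskD_snd (allow : String → Bool) (k : String) (p : String × String)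
    (hp : p ∈ fskD allow k) : p.2 = k := by
  unfold fskD at hp; split_ifs at hp <;> simp_all

theorem fskChunk_filter_DE (allow : String → Bool) (k : String) :
    (fskChunk allow k).filter (fun p => p.1 == "DE") = fskChunkDE allow k := by
  unfold fskChunk fskChunkDE fskChunkFE fskChunkBA fskE
  split_ifs <;> simp

theorem fskChunk_filter_FE (allow : String → Bool) (k : String) :
    (fskChunk allow k).filter (fun p => p.1 == "FE") = fskChunkFE allow k := by
  unfold fskChunk fskChunkDE fskChunkFE fskChunkBA fskE
  split_ifs <;> simp

theorem fskChunk_filter_BA (allow : String → Bool) (k : String) :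
    (fskChunk allow k).filter (fun p => p.1 == "BA") = fskChunkBA allow k := by
  unfold fskChunk fskChunkDE fskChunkFE fskChunkBA fskE
  split_ifs <;> simp

theorem fskD_filter_DE (allow : String → Bool) (k : String) :
    (fskD allow k).filter (fun p => p.1 == "DE") = fskD allow k := by
  unfold fskD; split_ifs <;> simp

theorem fskD_filter_FE (allow : String → Bool) (k : String) :
    (fskD allow k).filter (fun p => p.1 == "FE") = [] := by
  unfold fskD; split_ifs <;> simp

theorem fskD_filter_BA (allow : String → Bool) (k : String) :
    (fskD allow k).filter (fun p => p.1 == "BA") = [] := by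
  unfold fskD; split_ifs <;> simp

theorem fskD_flatMap (allow : String → Bool) (l : List String) :
    l.flatMap (fskD allow) = if allow "DE" then l.map (fun k => ("DE", k)) else [] := by
  induction l with
  | nil => split_ifs <;> simp
  | cons k rest ih =>
    simp only [List.flatMap_cons, ih]
    unfold fskD
    split_ifs <;> simp

-- a per-location chunk column of A's candidates list IS B's per-location staged filter
theorem fsk_flatMap_chunk (allow : String → Bool) (loc pt pd : String) (keys : List String) :
    keys.flatMap (fun k => if PySem.Str.startswith k "__" then [] else fskE allow loc pt pd k)
    = if allow loc then
        (keys.filter (fun k =>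
          (PySem.Str.isIn pt k || PySem.Str.isIn pd k) && !PySem.Str.startswith k "__")).map
          (fun k => (loc, k))
      else [] := by
  by_cases ha : allow loc
  · simp only [if_pos ha]
    induction keys with
    | nil => simp
    | cons k rest ih =>
      simp only [List.flatMap_cons, List.filter_cons, ih]
      by_cases hs : PySem.Str.startswith k "__"
      · have hs2 : PySem.Chars.startswith k.toList ['_', '_'] = true := hs
        simp [hs2]
      · have hs2 : PySem.Chars.startswith k.toList ['_', '_'] = false := Bool.eq_false_iff.mpr hs
        by_cases hh : PySem.Str.isIn pt k || PySem.Str.isIn pd k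
        · have hh2 : (PySem.Chars.isIn pt.toList k.toList || PySem.Chars.isIn pd.toList k.toList) = true := hh
          simp [fskE, hs2, hh2, ha]
        · have hh2 : (PySem.Chars.isIn pt.toList k.toList || PySem.Chars.isIn pd.toList k.toList) = false := Bool.eq_false_iff.mpr hh
          simp [fskE, hs2, hh2]
  · have ha' : allow loc = false := Bool.eq_false_iff.mpr ha
    simp only [ha', Bool.false_eq_true, if_neg (by simp : ¬ (False : Prop))]
    induction keys with
    | nil => simp
    | cons k rest ih =>
      simp only [List.flatMap_cons, ih, List.append_nil]
      split_ifs with hs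
      · rfl
      · simp [fskE, ha']

-- membership in a key's chunk, by its second component
theorem fsk_mem_chunk_snd (allow : String → Bool) (k' k : String) :
    k ∈ (fskChunk allow k').map Prod.snd ↔
      (k = k' ∧ PySem.Str.startswith k' "__" = false ∧
        (((PySem.Str.isIn "DE_time" k' || PySem.Str.isIn "DE-" k') && allow "DE") = true ∨
         ((PySem.Str.isIn "FE_time" k' || PySem.Str.isIn "FE-" k') && allow "FE") = true ∨
         ((PySem.Str.isIn "BA_time" k' || PySem.Str.isIn "BA-" k') && allow "BA") = true)) := by
  unfold fskChunk fskChunkDE fskChunkFE fskChunkBA fskE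
  split_ifs <;> simp_all

-- B's placed set has exactly the keys of A's candidates list
theorem fsk_placed_mem (sl : Option (List String)) (keys : List String) (k : String) :
    (k ∈ (["DE", "FE", "BA"].filter (fskAllowed sl)).flatMap
        (fskHits (keys.filter (fun k => !PySem.Str.startswith k "__"))))
    ↔ k ∈ (keys.flatMap (fskChunk (fskAllowed sl))).map Prod.snd := by
  have eDEt : (("DE" : String) ++ "_time") = "DE_time" := rfl
  have eDEd : (("DE" : String) ++ "-") = "DE-" := rfl
  have eFEt : (("FE" : String) ++ "_time") = "FE_time" := rfl
  have eFEd : (("FE" : String) ++ "-") = "FE-" := rfl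
  have eBAt : (("BA" : String) ++ "_time") = "BA_time" := rfl
  have eBAd : (("BA" : String) ++ "-") = "BA-" := rfl
  rw [List.map_flatMap]
  constructor
  · intro h
    rcases List.mem_flatMap.mp h with ⟨loc, hloc, hk⟩
    rcases List.mem_filter.mp hk with ⟨hk', hhit⟩
    rcases List.mem_filter.mp hk' with ⟨hkk, hsw⟩
    have hallow := (List.mem_filter.mp hloc).2
    have hloc3 := (List.mem_filter.mp hloc).1
    apply List.mem_flatMap.mpr
    refine ⟨k, hkk, (fsk_mem_chunk_snd (fskAllowed sl) k k).mpr
      ⟨rfl, by simpa using hsw, ?_⟩⟩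
    simp only [List.mem_cons, List.not_mem_nil, or_false] at hloc3
    rcases hloc3 with rfl | rfl | rfl
    · rw [eDEt, eDEd] at hhit
      exact Or.inl (Bool.and_eq_true_iff.mpr ⟨hhit, hallow⟩)
    · rw [eFEt, eFEd] at hhit
      exact Or.inr (Or.inl (Bool.and_eq_true_iff.mpr ⟨hhit, hallow⟩))
    · rw [eBAt, eBAd] at hhit
      exact Or.inr (Or.inr (Bool.and_eq_true_iff.mpr ⟨hhit, hallow⟩))
  · intro h
    rcases List.mem_flatMap.mp h with ⟨k', hk', hmem⟩
    rcases (fsk_mem_chunk_snd (fskAllowed sl) k' k).mp hmem with ⟨rfl, hsw, hcase⟩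
    have hmemf : k ∈ keys.filter (fun k => !PySem.Str.startswith k "__") :=
      List.mem_filter.mpr ⟨hk', by simp only [Bool.not_eq_eq_eq_not, Bool.not_true]; exact hsw⟩
    apply List.mem_flatMap.mpr
    rcases hcase with hc | hc | hc
    · exact ⟨"DE", List.mem_filter.mpr ⟨by simp, (Bool.and_eq_true_iff.mp hc).2⟩,
        List.mem_filter.mpr ⟨hmemf, by
          simp only [eDEt, eDEd]; exact (Bool.and_eq_true_iff.mp hc).1⟩⟩
    · exact ⟨"FE", List.mem_filter.mpr ⟨by simp, (Bool.and_eq_true_iff.mp hc).2⟩,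
        List.mem_filter.mpr ⟨hmemf, by
          simp only [eFEt, eFEd]; exact (Bool.and_eq_true_iff.mp hc).1⟩⟩
    · exact ⟨"BA", List.mem_filter.mpr ⟨by simp, (Bool.and_eq_true_iff.mp hc).2⟩,
        List.mem_filter.mpr ⟨hmemf, by
          simp only [eBAt, eBAd]; exact (Bool.and_eq_true_iff.mp hc).1⟩⟩

-- A's all(...) membership rescan equals the negated lookup in B's placed set
theorem fsk_all_eq_not_contains (sl : Option (List String)) (keys : List String) (k : String) :
    ((keys.flatMap (fskChunk (fskAllowed sl))).all (fun p => k != p.2))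
    = !(PySem.Set.contains (PySem.Set.ofList ((["DE", "FE", "BA"].filter (fskOk sl)).flatMap
        (fskHits (keys.filter (fun k => !PySem.Str.startswith k "__"))))) k) := by
  rw [fskOk_eq]
  have hmem : (k ∈ (["DE", "FE", "BA"].filter (fskAllowed sl)).flatMap
      (fskHits (keys.filter (fun k => !PySem.Str.startswith k "__"))))
      ↔ k ∈ (keys.flatMap (fskChunk (fskAllowed sl))).map Prod.snd := fsk_placed_mem sl keys k
  cases hc : PySem.Set.contains (PySem.Set.ofList ((["DE", "FE", "BA"].filter (fskAllowed sl)).flatMap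
      (fskHits (keys.filter (fun k => !PySem.Str.startswith k "__"))))) k
  · have hnot : k ∉ (keys.flatMap (fskChunk (fskAllowed sl))).map Prod.snd := by
      intro hk
      have : PySem.Set.contains (PySem.Set.ofList _) k = true :=
        (PySem.Set.contains_iff _ _).mpr ((PySem.Set.mem_ofList _ _).mpr (hmem.mpr hk))
      rw [hc] at this
      exact absurd this (by decide)
    simp only [Bool.not_false]
    rw [List.all_eq_true]
    intro p hp
    simp only [bne_iff_ne, ne_eq]
    intro hkp
    exact hnot (List.mem_map.mpr ⟨p, hp, hkp.symm⟩)
  · have hk : k ∈ (keys.flatMap (fskChunk (fskAllowed sl))).map Prod.snd :=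
      hmem.mp ((PySem.Set.mem_ofList _ _).mp ((PySem.Set.contains_iff _ _).mp hc))
    rcases List.mem_map.mp hk with ⟨p, hp, hpk⟩
    simp only [Bool.not_true]
    rw [Bool.eq_false_iff]
    intro hall
    have := (List.all_eq_true.mp hall) p hp
    simp [← hpk] at this

-- ===== VERDICT (by name: the statement is the Claim_ definition above) =====
theorem find_signal_keys_spec : Claim_equal_find_signal_keys := by
  intro md sl _
  unfold Spec_find_signal_keys find_signal_keys find_signal_keys_alt
  simp only []
  have hnd : ((PySem.Dict.ofList md).keys).Nodup := PySem.Dict.nodup_keys_ofList md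
  set keys := (PySem.Dict.ofList md).keys with hkeys
  set allow := fskAllowed sl with hallow
  set keys' := keys.filter (fun k => !PySem.Str.startswith k "__") with hkeys'
  -- A: first pass
  rw [fskA_loop1 sl keys []]
  simp only [List.nil_append]
  set c1 := keys.flatMap (fskChunk allow) with hc1
  -- A: second pass
  rw [fskA_loop2 sl keys hnd c1]
  set fb := (keys.filter (fun k => fskG k && c1.all (fun p => k != p.2))).flatMap (fskD allow) with hfb
  -- Nodup of the full candidates list
  have hnd1 : c1.Nodup :=
    fskNodup_flatMap keys hnd (fun k => fskChunk_nodup allow k) (fun k p hp => fskChunk_snd allow k p hp)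
  have hndfb : fb.Nodup :=
    fskNodup_flatMap _ (hnd.filter _) (fun k => fskD_nodup allow k) (fun k p hp => fskD_snd allow k p hp)
  have hdisj : c1.Disjoint fb := by
    intro p hp hpfb
    rcases List.mem_flatMap.mp hpfb with ⟨k, hk, hpk⟩
    rcases List.mem_filter.mp hk with ⟨hkk, hkpred⟩
    have hall := (Bool.and_eq_true_iff.mp hkpred).2
    have := (List.all_eq_true.mp hall) p hp
    have hsnd := fskD_snd allow k p hpk
    simp [← hsnd] at this
  have hnd2 : (c1 ++ fb).Nodup := List.Nodup.append hnd1 hndfb hdisj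
  -- A: the dedup/reorder pass is filter by location
  simp only [List.foldl_cons, List.foldl_nil]
  rw [fskA_dedupPass "DE" (c1 ++ fb) [] PySem.Set.empty hnd2 (by simp [PySem.Set.empty])]
  rw [fskA_dedupPass "FE" (c1 ++ fb) _ _ hnd2 (by
    intro p hp hfe
    simp only [PySem.Set.empty, List.nil_append, List.mem_filter]
    rintro ⟨-, hde⟩
    rw [hfe] at hde
    exact absurd hde (by decide))]
  rw [fskA_dedupPass "BA" (c1 ++ fb) _ _ hnd2 (by
    intro p hp hba
    simp only [PySem.Set.empty, List.nil_append, List.mem_append, List.mem_filter]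
    rintro (⟨-, h⟩ | ⟨-, h⟩) <;> rw [hba] at h <;> exact absurd h (by decide))]
  dsimp only
  simp only [List.nil_append]
  -- A's per-location slices of the candidates list
  have hA_DE : (c1 ++ fb).filter (fun p => p.1 == "DE")
      = keys.flatMap (fskChunkDE allow) ++ fb := by
    rw [List.filter_append, hc1, hfb, List.filter_flatMap, List.filter_flatMap]
    simp only [fskChunk_filter_DE, fskD_filter_DE]
  have hA_FE : (c1 ++ fb).filter (fun p => p.1 == "FE") = keys.flatMap (fskChunkFE allow) := by
    rw [List.filter_append, hc1, hfb, List.filter_flatMap, List.filter_flatMap]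
    simp only [fskChunk_filter_FE, fskD_filter_FE]
    simp [List.flatMap_eq_nil_iff]
  have hA_BA : (c1 ++ fb).filter (fun p => p.1 == "BA") = keys.flatMap (fskChunkBA allow) := by
    rw [List.filter_append, hc1, hfb, List.filter_flatMap, List.filter_flatMap]
    simp only [fskChunk_filter_BA, fskD_filter_BA]
    simp [List.flatMap_eq_nil_iff]
  rw [hA_DE, hA_FE, hA_BA]
  -- A's chunk columns are B's staged per-location filters
  have eDEt : (("DE" : String) ++ "_time") = "DE_time" := rfl
  have eDEd : (("DE" : String) ++ "-") = "DE-" := rfl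
  have eFEt : (("FE" : String) ++ "_time") = "FE_time" := rfl
  have eFEd : (("FE" : String) ++ "-") = "FE-" := rfl
  have eBAt : (("BA" : String) ++ "_time") = "BA_time" := rfl
  have eBAd : (("BA" : String) ++ "-") = "BA-" := rfl
  have hDE : keys.flatMap (fskChunkDE allow)
      = if allow "DE" then (fskHits keys' "DE").map (fun k => ("DE", k)) else [] := by
    unfold fskChunkDE
    rw [fsk_flatMap_chunk allow "DE" "DE_time" "DE-" keys]
    simp only [fskHits, eDEt, eDEd, hkeys', List.filter_filter]
  have hFE : keys.flatMap (fskChunkFE allow)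
      = if allow "FE" then (fskHits keys' "FE").map (fun k => ("FE", k)) else [] := by
    unfold fskChunkFE
    rw [fsk_flatMap_chunk allow "FE" "FE_time" "FE-" keys]
    simp only [fskHits, eFEt, eFEd, hkeys', List.filter_filter]
  have hBA : keys.flatMap (fskChunkBA allow)
      = if allow "BA" then (fskHits keys' "BA").map (fun k => ("BA", k)) else [] := by
    unfold fskChunkBA
    rw [fsk_flatMap_chunk allow "BA" "BA_time" "BA-" keys]
    simp only [fskHits, eBAt, eBAd, hkeys', List.filter_filter]
  -- A's fallback is B's staged fallback
  have hFB : fb = if allow "DE" then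
      (keys'.filter (fun k => PySem.Str.isIn "_time" k &&
        !(PySem.Set.contains (PySem.Set.ofList ((["DE", "FE", "BA"].filter (fskOk sl)).flatMap
          (fskHits keys'))) k))).map (fun k => ("DE", k))
      else [] := by
    have hfilt : keys.filter (fun k => fskG k && c1.all (fun p => k != p.2))
        = keys'.filter (fun k => PySem.Str.isIn "_time" k &&
            !(PySem.Set.contains (PySem.Set.ofList ((["DE", "FE", "BA"].filter (fskOk sl)).flatMap
              (fskHits keys'))) k)) := by
      rw [hkeys', List.filter_filter]
      apply List.filter_congr
      intro k _
      rw [← fsk_all_eq_not_contains sl keys k, ← hc1]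
      unfold fskG
      cases hsw : PySem.Str.startswith k "__" <;>
        cases hti : PySem.Str.isIn "_time" k <;>
        cases hall : c1.all (fun p => k != p.2) <;> rfl
    rw [hfb, fskD_flatMap, hfilt]
  -- B: expand the three-location fold and match componentwise
  rw [hDE, hFE, hBA, hFB, fskOk_eq, ← hallow]
  by_cases a1 : allow "DE" <;> by_cases a2 : allow "FE" <;> by_cases a3 : allow "BA" <;>
    simp [a1, a2, a3, List.append_assoc]
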